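-- pv_equiv track=rewrite | github.com/24kczjdz/Smart-Public-Transport-Advisor | app.py | highlight_route_edges
-- ===== SOURCE A (Python) =====
-- def highlight_route_edges(journey, origin):
--     """Convert a journey path into a list of directed (from, to) edge tuples.
--
--     Args:
--         journey: A path as returned by nv02.find_journeys – list of
--                  (stop_id, duration, cost, mode) tuples.
--         origin:  The starting stop ID (not included in journey segments).
--
--     Returns:
--         List of (from_id, to_id) tuples in traversal order.
--     """
--     edges = []
--     current = origin
--     for step in journey:
--         next_node = step[0]
--         edges.append((current, next_node))
--         current = next_node
--     return edges
-- ===== SOURCE B (Python) =====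
-- def highlight_route_edges(journey, origin):
--     """Recursive decomposition: the first edge goes origin -> journey[0][0];
--     the rest is the same problem on the tail with that node as the new origin."""
--     if not journey:
--         return []
--     head = journey[0][0]
--     return [(origin, head)] + highlight_route_edges(journey[1:], head)
-- ===== Notes on version B (the rewrite author's own statement) =====
-- stated objective: alternative
-- what changed: Replaces A's iterative loop with a mutable 'current' accumulator and manual appends by a structural recursion: emit the head edge (origin, journey[0][0]) and recurse on the tail with the new origin; no accumulator state.
import Mathlib
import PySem

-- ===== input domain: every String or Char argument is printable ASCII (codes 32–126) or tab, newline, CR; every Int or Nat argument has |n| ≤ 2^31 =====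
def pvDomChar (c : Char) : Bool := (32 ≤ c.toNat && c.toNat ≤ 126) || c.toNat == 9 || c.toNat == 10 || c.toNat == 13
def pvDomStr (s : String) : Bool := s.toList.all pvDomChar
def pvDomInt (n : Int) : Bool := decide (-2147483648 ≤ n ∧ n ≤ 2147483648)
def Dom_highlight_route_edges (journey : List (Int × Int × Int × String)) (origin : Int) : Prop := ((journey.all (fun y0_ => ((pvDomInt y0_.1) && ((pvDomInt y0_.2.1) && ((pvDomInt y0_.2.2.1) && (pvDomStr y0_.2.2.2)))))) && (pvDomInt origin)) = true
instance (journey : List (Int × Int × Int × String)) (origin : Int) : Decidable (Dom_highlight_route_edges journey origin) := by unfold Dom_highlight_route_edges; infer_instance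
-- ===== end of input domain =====

-- B replaces A's iterative accumulator loop with a structural recursion (head edge + recurse on tail); alternative decomposition, same cost.


-- ===== PORT A =====
-- edges = []; current = origin; for step in journey: edges.append((current, step[0])); current = step[0]
def highlight_route_edges (journey : List (Int × Int × Int × String)) (origin : Int) : List (Int × Int) :=
  (journey.foldl (fun (st : List (Int × Int) × Int) step =>
    (st.1 ++ [(st.2, step.1)], step.1)) ([], origin)).1

-- ===== PORT B =====
-- recursive: if not journey: []; else [(origin, journey[0][0])] + recurse(journey[1:], journey[0][0])
def highlight_route_edges_alt (journey : List (Int × Int × Int × String)) (origin : Int) : List (Int × Int) :=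
  match journey with
  | [] => []
  | step :: rest => (origin, step.1) :: highlight_route_edges_alt rest step.1

-- ===== PRECONDITION & SPEC =====
def Spec_highlight_route_edges (journey : List (Int × Int × Int × String)) (origin : Int) (out : List (Int × Int)) : Prop := out = highlight_route_edges_alt journey origin
instance (journey : List (Int × Int × Int × String)) (origin : Int) (out : List (Int × Int)) : Decidable (Spec_highlight_route_edges journey origin out) := by unfold Spec_highlight_route_edges; infer_instance

-- ===== CLAIM =====
def Claim_equal_highlight_route_edges : Prop := ∀ (journey : List (Int × Int × Int × String)) (origin : Int), Dom_highlight_route_edges journey origin → Spec_highlight_route_edges journey origin (highlight_route_edges journey origin)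

-- ===== LEMMAS AND PROOFS =====
theorem foldl_edges_eq (journey : List (Int × Int × Int × String)) (origin : Int) (acc : List (Int × Int)) :
    (journey.foldl (fun (st : List (Int × Int) × Int) step =>
      (st.1 ++ [(st.2, step.1)], step.1)) (acc, origin)).1 =
    acc ++ highlight_route_edges_alt journey origin := by
  induction journey generalizing origin acc with
  | nil => simp [highlight_route_edges_alt]
  | cons hd tl ih => simp [List.foldl, ih, highlight_route_edges_alt]

-- ===== VERDICT =====
theorem highlight_route_edges_spec : Claim_equal_highlight_route_edges := by
  intro journey origin _
  unfold Spec_highlight_route_edges highlight_route_edges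
  simpa using foldl_edges_eq journey origin []
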